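-- pv_equiv track=rewrite | github.com/mjohnson139/kiln | src/kiln/dot.py | _statements
-- ===== SOURCE A (Python) =====
-- def _statements(text: str) -> list[str]:
--     statements: list[str] = []
--     current: list[str] = []
--     in_quotes = False
--     escaped = False
--     for char in text:
--         if escaped:
--             current.append(char)
--             escaped = False
--             continue
--         if char == "\\":
--             current.append(char)
--             escaped = True
--             continue
--         if char == '"':
--             current.append(char)
--             in_quotes = not in_quotes
--             continue
--         if not in_quotes and char in "{};":
--             chunk = "".join(current).strip()
--             if chunk:
--                 statements.append(chunk)
--             current = []
--             if char in "{}":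
--                 statements.append(char)
--             continue
--         current.append(char)
--     chunk = "".join(current).strip()
--     if chunk:
--         statements.append(chunk)
--     return statements
-- ===== SOURCE B (Python) =====
-- def _statements(text: str) -> list[str]:
--     statements: list[str] = []
--     buf: list[str] = []
--
--     def flush() -> None:
--         chunk = "".join(buf).strip()
--         if chunk:
--             statements.append(chunk)
--         buf.clear()
--
--     i, n = 0, len(text)
--     while i < n:
--         c = text[i]
--         if c == "\\":
--             # escape pair (or a lone trailing backslash)
--             buf.append(text[i:i + 2])
--             i += 2
--         elif c == '"':
--             # whole quoted string, escapes honoured, closing quote optional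
--             j = i + 1
--             while j < n and text[j] != '"':
--                 j += 2 if text[j] == "\\" else 1
--             j = min(j + 1, n)
--             buf.append(text[i:j])
--             i = j
--         elif c in "{};":
--             flush()
--             if c != ";":
--                 statements.append(c)
--             i += 1
--         else:
--             # run of ordinary characters
--             j = i
--             while j < n and text[j] not in '{};"\\':
--                 j += 1
--             buf.append(text[i:j])
--             i = j
--     flush()
--     return statements
-- ===== Notes on version B (the rewrite author's own statement) =====
-- stated objective: alternative
-- what changed: A walks the text one character at a time carrying escaped/in_quotes boolean flags; B is a tokenizer that consumes a whole lexeme per loop iteration (escape pair, complete quoted string via an inner scan, delimiter, or a maximal run of ordinary characters) and flushes the token buffer on delimiters.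
import Mathlib
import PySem

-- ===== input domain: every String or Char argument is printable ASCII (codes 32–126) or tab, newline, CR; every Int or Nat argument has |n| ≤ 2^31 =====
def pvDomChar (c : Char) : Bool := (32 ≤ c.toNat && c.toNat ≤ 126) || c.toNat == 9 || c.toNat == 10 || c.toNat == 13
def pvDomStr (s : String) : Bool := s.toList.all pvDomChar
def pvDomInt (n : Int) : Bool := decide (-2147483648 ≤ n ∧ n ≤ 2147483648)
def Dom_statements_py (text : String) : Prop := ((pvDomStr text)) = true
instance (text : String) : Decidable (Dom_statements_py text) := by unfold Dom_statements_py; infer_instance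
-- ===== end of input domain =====

-- B replaces A's per-character flag machine (escaped/in_quotes) by a tokenizer that consumes a
-- whole escape pair / quoted string / ordinary run / delimiter at a time (objective: alternative).

-- ===== PORT A =====
-- State: (statements, current, in_quotes, escaped); one step = one iteration of A's for-loop.
def pvStepA (st : List String × List Char × Bool × Bool) (c : Char) :
    List String × List Char × Bool × Bool :=
  match st with
  | (stmts, cur, inq, esc) =>
    if esc then (stmts, cur ++ [c], inq, false)
    else if c = '\\' then (stmts, cur ++ [c], inq, true)
    else if c = '"' then (stmts, cur ++ [c], !inq, false)
    else if inq = false ∧ (c = '{' ∨ c = '}' ∨ c = ';') then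
      let chunk := PySem.Str.strip (String.ofList cur)
      let stmts1 := if chunk ≠ "" then stmts ++ [chunk] else stmts
      let stmts2 := if c = '{' ∨ c = '}' then stmts1 ++ [String.ofList [c]] else stmts1
      (stmts2, [], inq, false)
    else (stmts, cur ++ [c], inq, false)

def statements_py (text : String) : List String :=
  let s := text.toList.foldl pvStepA ([], [], false, false)
  let chunk := PySem.Str.strip (String.ofList s.2.1)
  if chunk ≠ "" then s.1 ++ [chunk] else s.1

-- ===== PORT B =====
-- flush(): join the buffer, strip it, keep it if non-empty, reset the buffer.
def pvFlushB (buf : List String) (stmts : List String) : List String :=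
  let chunk := PySem.Str.strip (PySem.Str.join "" buf)
  if chunk ≠ "" then stmts ++ [chunk] else stmts

-- ordinary character: not a delimiter, quote or backslash (Source B: `not in '{};"\\'`)
def pvOrd (c : Char) : Bool := !(c = '{' ∨ c = '}' ∨ c = ';' ∨ c = '"' ∨ c = '\\')

-- inner while of the quote case: scan to the closing quote (escapes skip two chars),
-- returning (consumed chars incl. the closing quote if present, remainder).
def pvScanQuote : List Char → List Char × List Char
  | [] => ([], [])
  | '"' :: rest => (['"'], rest)
  | '\\' :: c :: rest => let p := pvScanQuote rest; ('\\' :: c :: p.1, p.2)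
  | '\\' :: [] => (['\\'], [])
  | c :: rest => let p := pvScanQuote rest; (c :: p.1, p.2)

theorem pvScanQuote_len (l : List Char) : (pvScanQuote l).2.length ≤ l.length := by
  induction l using pvScanQuote.induct <;> simp [pvScanQuote] <;> omega

-- main while-loop of Source B: one iteration consumes one whole token.
def pvTokGo (l : List Char) (buf : List String) (stmts : List String) : List String :=
  match l with
  | [] => pvFlushB buf stmts
  | c :: rest =>
    if c = '\\' then
      match rest with
      | [] => pvTokGo [] (buf ++ [String.ofList ['\\']]) stmts
      | c2 :: rest' => pvTokGo rest' (buf ++ [String.ofList ['\\', c2]]) stmts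
    else if c = '"' then
      let p := pvScanQuote rest
      pvTokGo p.2 (buf ++ [String.ofList ('"' :: p.1)]) stmts
    else if c = '{' ∨ c = '}' ∨ c = ';' then
      let stmts1 := pvFlushB buf stmts
      let stmts2 := if c ≠ ';' then stmts1 ++ [String.ofList [c]] else stmts1
      pvTokGo rest [] stmts2
    else
      pvTokGo (rest.dropWhile pvOrd) (buf ++ [String.ofList (c :: rest.takeWhile pvOrd)]) stmts
termination_by l.length
decreasing_by
  · simp
  · simp
  · simpa using Nat.lt_succ_of_le (pvScanQuote_len rest)
  · simp
  · exact Nat.lt_succ_of_le (List.length_dropWhile_le _ _)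

def statements_py_alt (text : String) : List String :=
  pvTokGo text.toList [] []

-- ===== PRECONDITION & SPEC =====
def Spec_statements_py (text : String) (out : List String) : Prop := out = statements_py_alt text
instance (text : String) (out : List String) : Decidable (Spec_statements_py text out) := by unfold Spec_statements_py; infer_instance

-- ===== CLAIM (what is proved, stated in full; the proofs are below) =====
def Claim_equal_statements_py : Prop := ∀ (text : String), Dom_statements_py text → Spec_statements_py text (statements_py text)

-- ===== LEMMAS AND PROOFS =====

-- run A's loop over l from state st, then do the final flush (A's code after the loop)
def pvFinish (l : List Char) (st : List String × List Char × Bool × Bool) : List String :=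
  let s := l.foldl pvStepA st
  let chunk := PySem.Str.strip (String.ofList s.2.1)
  if chunk ≠ "" then s.1 ++ [chunk] else s.1

theorem pvJoin_flatten (xs : List (List Char)) : List.intercalate ([] : List Char) xs = xs.flatten := by
  induction xs with
  | nil => unfold List.intercalate; simp
  | cons a t ih =>
    cases t <;> unfold List.intercalate <;> simp_all [List.intersperse, List.intercalate]

theorem pvJoin_eq (buf : List String) (cur : List Char)
    (h : PySem.Str.join "" buf = String.ofList cur) (t : List Char) :
    PySem.Str.join "" (buf ++ [String.ofList t]) = String.ofList (cur ++ t) := by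
  apply String.toList_inj.mp
  have h' := congrArg String.toList h
  simp only [PySem.Str.toList_join, PySem.Chars.join, String.toList_ofList, List.map_append,
    List.map_cons, List.map_nil] at h' ⊢
  have he : "".toList = ([] : List Char) := rfl
  rw [he, pvJoin_flatten] at h' ⊢
  simp [h']

theorem pvFlush_eq (buf : List String) (cur : List Char)
    (h : PySem.Str.join "" buf = String.ofList cur) (stmts : List String) :
    pvFlushB buf stmts = (if PySem.Str.strip (String.ofList cur) ≠ "" then stmts ++ [PySem.Str.strip (String.ofList cur)] else stmts) := by
  simp [pvFlushB, h]

-- A's loop inside a quoted region consumes exactly pvScanQuote's token, appending it to current.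
theorem pvQuoteLemma (rest : List Char) :
    ∀ (stmts : List String) (cur : List Char),
    pvFinish rest (stmts, cur, true, false)
      = pvFinish (pvScanQuote rest).2 (stmts, cur ++ (pvScanQuote rest).1, false, false) := by
  induction rest using pvScanQuote.induct with
  | case1 => intro stmts cur; simp [pvScanQuote, pvFinish]
  | case2 rest => intro stmts cur; simp [pvScanQuote, pvFinish, pvStepA]
  | case3 c rest ih =>
    intro stmts cur
    have h1 : pvStepA (stmts, cur, true, false) '\\' = (stmts, cur ++ ['\\'], true, true) := by
      simp [pvStepA]
    have h2 : pvStepA (stmts, cur ++ ['\\'], true, true) c = (stmts, cur ++ ['\\', c], true, false) := by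
      simp [pvStepA]
    simp only [pvScanQuote, pvFinish, List.foldl_cons, h1, h2] at *
    rw [ih (stmts) (cur ++ ['\\', c])]
    simp
  | case4 => intro stmts cur; simp [pvScanQuote, pvFinish, pvStepA]
  | case5 c rest hq hb1 hb2 ih =>
    intro stmts cur
    have hq' : ¬ c = '"' := fun h => hq h
    have hb' : ¬ c = '\\' := by
      intro h
      cases rest with
      | nil => exact hb2 h rfl
      | cons a r => exact hb1 a r h rfl
    have h1 : pvStepA (stmts, cur, true, false) c = (stmts, cur ++ [c], true, false) := by
      simp [pvStepA, hq', hb']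
    simp only [pvScanQuote, pvFinish, List.foldl_cons, h1] at *
    rw [ih stmts (cur ++ [c])]
    simp

-- A's loop over a run of ordinary characters just appends them to current.
theorem pvRunLemma (l : List Char) :
    ∀ (stmts : List String) (cur : List Char),
    pvFinish l (stmts, cur, false, false)
      = pvFinish (l.dropWhile pvOrd) (stmts, cur ++ l.takeWhile pvOrd, false, false) := by
  induction l with
  | nil => intro stmts cur; simp
  | cons c rest ih =>
    intro stmts cur
    by_cases hc : pvOrd c = true
    · have hprops : ¬c = '\\' ∧ ¬c = '"' ∧ ¬(c = '{' ∨ c = '}' ∨ c = ';') := by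
        simp [pvOrd] at hc; tauto
      have h1 : pvStepA (stmts, cur, false, false) c = (stmts, cur ++ [c], false, false) := by
        simp [pvStepA, hprops.1, hprops.2.1, hprops.2.2]
      simp only [List.takeWhile_cons, List.dropWhile_cons, hc, if_pos, pvFinish,
        List.foldl_cons, h1] at *
      rw [ih stmts (cur ++ [c])]
      simp
    · simp only [List.takeWhile_cons, List.dropWhile_cons, hc] at *
      simp

-- the main loop invariant: B's token loop from (buf, stmts) computes A's remaining run,
-- provided the joined buffer equals A's current character list.
theorem pvMain : ∀ (n : Nat) (l : List Char), l.length ≤ n →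
    ∀ (buf stmts : List String) (cur : List Char),
    PySem.Str.join "" buf = String.ofList cur →
    pvTokGo l buf stmts = pvFinish l (stmts, cur, false, false) := by
  intro n
  induction n with
  | zero =>
    intro l hl buf stmts cur h
    have : l = [] := List.eq_nil_of_length_eq_zero (Nat.le_zero.mp hl)
    subst this
    rw [pvTokGo, pvFlush_eq buf cur h]
    rfl
  | succ n ih =>
    intro l hl buf stmts cur h
    cases l with
    | nil =>
      rw [pvTokGo, pvFlush_eq buf cur h]
      rfl
    | cons c rest =>
      by_cases hb : c = '\\'
      · subst hb
        cases rest with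
        | nil =>
          rw [pvTokGo]
          rw [ih [] (by simp) _ stmts (cur ++ ['\\']) (pvJoin_eq buf cur h ['\\'])]
          simp [pvFinish, pvStepA]
        | cons c2 rest' =>
          rw [pvTokGo]
          have hlen : rest'.length ≤ n := by simp at hl; omega
          rw [ih rest' hlen _ stmts (cur ++ ['\\', c2]) (pvJoin_eq buf cur h ['\\', c2])]
          have h1 : pvStepA (stmts, cur, false, false) '\\' = (stmts, cur ++ ['\\'], false, true) := by
            simp [pvStepA]
          have h2 : pvStepA (stmts, cur ++ ['\\'], false, true) c2 = (stmts, cur ++ ['\\', c2], false, false) := by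
            simp [pvStepA]
          simp [pvFinish, List.foldl_cons, h1, h2]
      · by_cases hq : c = '"'
        · subst hq
          rw [pvTokGo.eq_def]
          simp only [if_neg (by decide : ¬ ('"' : Char) = '\\')]
          have hlen : (pvScanQuote rest).2.length ≤ n := by
            have := pvScanQuote_len rest
            simp at hl; omega
          rw [ih _ hlen _ stmts (cur ++ '"' :: (pvScanQuote rest).1)
                (pvJoin_eq buf cur h ('"' :: (pvScanQuote rest).1))]
          have h1 : pvStepA (stmts, cur, false, false) '"' = (stmts, cur ++ ['"'], true, false) := by
            simp [pvStepA]
          have hqq := pvQuoteLemma rest stmts (cur ++ ['"'])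
          simp only [pvFinish, List.foldl_cons, h1] at hqq ⊢
          rw [hqq]
          simp
        · by_cases hd : c = '{' ∨ c = '}' ∨ c = ';'
          · rw [pvTokGo.eq_def]
            simp only [if_neg hb, if_neg hq, if_pos hd]
            have hlen : rest.length ≤ n := by simp at hl; omega
            rw [ih rest hlen [] _ [] rfl]
            have h1 : pvStepA (stmts, cur, false, false) c =
                (  let chunk := PySem.Str.strip (String.ofList cur)
                   let stmts1 := if chunk ≠ "" then stmts ++ [chunk] else stmts
                   let stmts2 := if c = '{' ∨ c = '}' then stmts1 ++ [String.ofList [c]] else stmts1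
                   (stmts2, [], false, false)) := by
              have hb2 : ¬ c = '\\' := hb
              have hq2 : ¬ c = '"' := hq
              simp [pvStepA, hb2, hq2, hd]
            simp only [pvFinish, List.foldl_cons, h1]
            rw [pvFlush_eq buf cur h]
            have harm : (if c ≠ ';' then
                  (if PySem.Str.strip (String.ofList cur) ≠ "" then stmts ++ [PySem.Str.strip (String.ofList cur)] else stmts) ++ [String.ofList [c]]
                else
                  (if PySem.Str.strip (String.ofList cur) ≠ "" then stmts ++ [PySem.Str.strip (String.ofList cur)] else stmts))
              = (if c = '{' ∨ c = '}' then
                  (if PySem.Str.strip (String.ofList cur) ≠ "" then stmts ++ [PySem.Str.strip (String.ofList cur)] else stmts) ++ [String.ofList [c]]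
                else
                  (if PySem.Str.strip (String.ofList cur) ≠ "" then stmts ++ [PySem.Str.strip (String.ofList cur)] else stmts)) := by
              rcases hd with h'|h'|h' <;> subst h' <;> simp
            rw [harm]
          · have ho : pvOrd c = true := by simp [pvOrd, hb, hq]; tauto
            rw [pvTokGo.eq_def]
            simp only [if_neg hb, if_neg hq, if_neg hd]
            have hlen : (rest.dropWhile pvOrd).length ≤ n := by
              have := List.length_dropWhile_le pvOrd rest
              simp at hl; omega
            rw [ih _ hlen _ stmts (cur ++ c :: rest.takeWhile pvOrd)
                  (pvJoin_eq buf cur h (c :: rest.takeWhile pvOrd))]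
            have hr := pvRunLemma (c :: rest) stmts cur
            simp only [List.takeWhile_cons, List.dropWhile_cons, ho, if_pos] at hr
            rw [hr]

-- ===== VERDICT (by name: the statement is the Claim_ definition above) =====
theorem statements_py_spec : Claim_equal_statements_py := by
  intro text _
  unfold Spec_statements_py statements_py_alt
  rw [pvMain text.toList.length text.toList le_rfl [] [] [] rfl]
  rfl
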